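-- pv_equiv track=rewrite | github.com/dirtysalt/codes | misc/leetcode/exclusive-time-of-functions.py | exclusiveTime
-- ===== SOURCE A (Python) =====
-- def exclusiveTime(n, logs):
--     """
--     :type n: int
--     :type logs: List[str]
--     :rtype: List[int]
--     """
--
--     st = []
--     times = [0] * n
--     for log in logs:
--         (func_id, action, ts) = log.split(':')
--         func_id = int(func_id)
--         ts = int(ts)
--
--         if action == 'start':
--             if st:
--                 xid, xts = st[-1]
--                 times[xid] += (ts - xts)
--             st.append((func_id, ts))
--
--         else:
--             xid, xts = st[-1]
--             st.pop()
--             assert func_id == xid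
--             times[xid] += (ts - xts + 1)
--
--             if st:
--                 xid, _ = st[-1]
--                 st.pop()
--                 st.append((xid, ts + 1))
--     return times
-- ===== SOURCE B (Python) =====
-- def exclusiveTime(n, logs):
--     times = [0] * n
--     events = []
--     for log in logs:
--         fid, action, ts = log.split(':')
--         events.append((int(fid), action == 'start', int(ts)))
--
--     def run(i):
--         # events[i] is the header of one call; consume the whole call
--         # (nested calls recursively) and return the index just after it.
--         fid = events[i][0]
--         cur = events[i][2]
--         i += 1
--         while i < len(events):
--             fid2, is_start2, ts2 = events[i]
--             if is_start2:
--                 times[fid] += ts2 - cur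
--                 i = run(i)
--                 cur = events[i - 1][2] + 1
--             else:
--                 assert fid2 == fid
--                 times[fid] += ts2 - cur + 1
--                 return i + 1
--         return i
--
--     i = 0
--     while i < len(events):
--         i = run(i)
--     return times
-- ===== Notes on version B (the rewrite author's own statement) =====
-- stated objective: alternative
-- what changed: B first parses all logs into an event list and then walks the call tree by recursive descent (one recursive call per logged function call, returning the resume point to its parent), instead of A's single loop over a stack of (id, timestamp) pairs that pops and re-pushes the top entry to rewrite its timestamp on every 'end'.
import Mathlib
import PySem

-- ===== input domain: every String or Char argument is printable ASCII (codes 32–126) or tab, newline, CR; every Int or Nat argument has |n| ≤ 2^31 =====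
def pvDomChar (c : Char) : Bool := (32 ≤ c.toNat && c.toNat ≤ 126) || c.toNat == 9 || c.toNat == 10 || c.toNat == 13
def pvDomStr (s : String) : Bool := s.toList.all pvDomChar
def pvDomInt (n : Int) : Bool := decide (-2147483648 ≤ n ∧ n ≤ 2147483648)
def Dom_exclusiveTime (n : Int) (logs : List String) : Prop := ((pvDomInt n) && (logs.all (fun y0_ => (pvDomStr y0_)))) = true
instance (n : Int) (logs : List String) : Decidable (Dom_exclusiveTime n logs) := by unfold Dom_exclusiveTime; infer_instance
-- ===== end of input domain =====

-- B replaces A's single event loop over a stack of (id, timestamp) pairs (with pop-and-re-push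
-- rewriting of the top timestamp) by a pre-parsing pass followed by a recursive descent over the
-- call tree: one recursive call per function call in the logs (objective: alternative).

-- shared log parsing: "id:action:ts" (the identical lines of Python in A and B)
def parseLog (s : String) : Option (Int × List Char × Int) :=
  match PySem.Chars.splitOn s.toList [':'] with
  | [a, act, c] =>
    match PySem.Int.ofChars? a, PySem.Int.ofChars? c with
    | some fid, some ts => some (fid, act, ts)
    | _, _ => none
  | _ => none

-- ===== PORT A =====
def goA (times : List Int) (st : List (Int × Int)) : List String → List Int
  | [] => times
  | log :: rest =>
    match parseLog log with
    | none => times  -- Python raises here (bad split/int); outside Pre_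
    | some (fid, act, ts) =>
      if act = "start".toList then
        match st with
        | (xid, xts) :: _ =>
          goA (PySem.List.pySetD times xid (PySem.List.pyGetD times xid 0 + (ts - xts)))
            ((fid, ts) :: st) rest
        | [] => goA times ((fid, ts) :: st) rest
      else
        match st with
        | [] => times  -- IndexError; outside Pre_
        | (xid, xts) :: st' =>
          if fid = xid then
            let times' := PySem.List.pySetD times xid (PySem.List.pyGetD times xid 0 + (ts - xts + 1))
            match st' with
            | (yid, _) :: st'' => goA times' ((yid, ts + 1) :: st'') rest
            | [] => goA times' [] rest
          else times  -- AssertionError; outside Pre_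

def exclusiveTime (n : Int) (logs : List String) : List Int :=
  goA (List.replicate n.toNat 0) [] logs

-- ===== PORT B =====
-- B's first pass: parse every log into (id, action == 'start', ts); Python raises on a bad log
-- (outside Pre_), the port answers none there.
def parseAll : List String → Option (List (Int × Bool × Int))
  | [] => some []
  | log :: rest =>
    match parseLog log with
    | none => none
    | some (fid, act, ts) =>
      match parseAll rest with
      | none => none
      | some es => some ((fid, act == "start".toList, ts) :: es)

-- B's `run`: `events` is what follows the header (fid, ·, header-ts); `cur` starts at the header's
-- ts.  Returns (times, events after this call, ts of the last event consumed).  Python indexes the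
-- flat list; the port carries the suffix.  Fuel only makes the nested recursion structural; the
-- entry point passes logs.length + 1, which the callers never exhaust.  When the events run out
-- (an unclosed call) Python computes the unused resume point from events[i-1]; the port returns
-- `cur` as the (equally unused, the remaining suffix is empty) third component.
def runB : Nat → List Int → List (Int × Bool × Int) → Int → Int → List Int × List (Int × Bool × Int) × Int
  | 0, times, events, _, cur => (times, events, cur)  -- fuel never exhausted by the entry point
  | fuel + 1, times, events, fid, cur =>
    match events with
    | [] => (times, [], cur)  -- events exhausted: the call is abandoned, as in Python B
    | (fid2, isStart2, ts2) :: rest =>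
      if isStart2 then
        match runB fuel (PySem.List.pySetD times fid (PySem.List.pyGetD times fid 0 + (ts2 - cur))) rest fid2 ts2 with
        | (t2, rest2, lastTs) => runB fuel t2 rest2 fid (lastTs + 1)
      else
        if fid2 = fid then
          (PySem.List.pySetD times fid (PySem.List.pyGetD times fid 0 + (ts2 - cur + 1)), rest, ts2)
        else (times, rest, ts2)  -- AssertionError in Python; outside Pre_

-- B's outer `while i < len(events)` loop: one `run` per top-level call
def topB : Nat → List Int → List (Int × Bool × Int) → List Int
  | 0, times, _ => times
  | _ + 1, times, [] => times
  | fuel + 1, times, (fid, _, ts) :: rest =>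
    match runB fuel times rest fid ts with
    | (t', rest', _) => topB fuel t' rest'

def exclusiveTime_alt (n : Int) (logs : List String) : List Int :=
  match parseAll logs with
  | none => List.replicate n.toNat 0  -- Python B raises while parsing; outside Pre_
  | some events => topB (logs.length + 1) (List.replicate n.toNat 0) events

-- ===== PRECONDITION & SPEC =====
-- validity check of the logs (parse, stack-balanced ends with matching ids, times-index in range):
-- exactly the inputs on which the Python A returns without an exception
def okLogs (len : Nat) (stk : List Int) : List String → Bool
  | [] => true
  | log :: rest =>
    match parseLog log with
    | none => false
    | some (fid, act, _) =>
      if act = "start".toList then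
        (match stk with
         | top :: _ => decide (PySem.Raise.InRange len top)
         | [] => true) && okLogs len (fid :: stk) rest
      else
        match stk with
        | [] => false
        | top :: stk' => (fid == top) && decide (PySem.Raise.InRange len top) && okLogs len stk' rest

def Pre_exclusiveTime (n : Int) (logs : List String) : Prop := okLogs n.toNat [] logs = true
instance (n : Int) (logs : List String) : Decidable (Pre_exclusiveTime n logs) := by
  unfold Pre_exclusiveTime; infer_instance

def pvWitness_exclusiveTime : Int × List String :=
  (2, ["0:start:0", "1:start:2", "1:end:5", "0:end:6"])

def Spec_exclusiveTime (n : Int) (logs : List String) (out : List Int) : Prop := out = exclusiveTime_alt n logs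
instance (n : Int) (logs : List String) (out : List Int) : Decidable (Spec_exclusiveTime n logs out) := by unfold Spec_exclusiveTime; infer_instance

-- ===== CLAIM (what is proved, stated in full; the proofs are below) =====
def Claim_equal_exclusiveTime : Prop := ∀ (n : Int) (logs : List String), Dom_exclusiveTime n logs → Pre_exclusiveTime n logs → Spec_exclusiveTime n logs (exclusiveTime n logs)

-- ===== LEMMAS AND PROOFS =====

-- event-level restatement of A's loop (proof-only helper)
def goAe (times : List Int) (st : List (Int × Int)) : List (Int × Bool × Int) → List Int
  | [] => times
  | (fid, isStart, ts) :: rest =>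
    if isStart then
      match st with
      | (xid, xts) :: _ =>
        goAe (PySem.List.pySetD times xid (PySem.List.pyGetD times xid 0 + (ts - xts)))
          ((fid, ts) :: st) rest
      | [] => goAe times ((fid, ts) :: st) rest
    else
      match st with
      | [] => times
      | (xid, xts) :: st' =>
        if fid = xid then
          let times' := PySem.List.pySetD times xid (PySem.List.pyGetD times xid 0 + (ts - xts + 1))
          match st' with
          | (yid, _) :: st'' => goAe times' ((yid, ts + 1) :: st'') rest
          | [] => goAe times' [] rest
        else times

-- event-level restatement of okLogs (proof-only helper)
def okE (len : Nat) (stk : List Int) : List (Int × Bool × Int) → Bool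
  | [] => true
  | (fid, isStart, _) :: rest =>
    if isStart then
      (match stk with
       | top :: _ => decide (PySem.Raise.InRange len top)
       | [] => true) && okE len (fid :: stk) rest
    else
      match stk with
      | [] => false
      | top :: stk' => (fid == top) && decide (PySem.Raise.InRange len top) && okE len stk' rest

-- rewrite the timestamp of the top stack entry (what A does after closing a call)
def retop (st : List (Int × Int)) (v : Int) : List (Int × Int) :=
  match st with
  | [] => []
  | (y, _) :: tl => (y, v) :: tl

lemma bridgeA : ∀ (logs : List String) (evs : List (Int × Bool × Int)),
    parseAll logs = some evs → ∀ (times : List Int) (st : List (Int × Int)),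
    goA times st logs = goAe times st evs := by
  intro logs
  induction logs with
  | nil => intro evs h times st; cases h; rfl
  | cons log rest ih =>
    intro evs h times st
    simp only [parseAll] at h
    cases hp : parseLog log with
    | none => rw [hp] at h; exact absurd h (by simp)
    | some v =>
      obtain ⟨fid, act, ts⟩ := v
      rw [hp] at h
      cases hr : parseAll rest with
      | none => rw [hr] at h; exact absurd h (by simp)
      | some es =>
        rw [hr] at h
        simp only [Option.some.injEq] at h
        subst h
        simp only [goA, goAe, hp]
        by_cases hs : act = "start".toList
        · simp only [hs, beq_self_eq_true, if_pos]
          cases st with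
          | nil => exact ih es hr _ _
          | cons p tl => obtain ⟨xid, xts⟩ := p; exact ih es hr _ _
        · have hb : (act == "start".toList) = false := by
            exact beq_eq_false_iff_ne.mpr hs
          simp only [if_neg hs, hb, Bool.false_eq_true, if_false]
          cases st with
          | nil => rfl
          | cons p tl =>
            obtain ⟨xid, xts⟩ := p
            by_cases hf : fid = xid
            · simp only [if_pos hf]
              cases tl with
              | nil => exact ih es hr _ _
              | cons q tl' => obtain ⟨yid, yts⟩ := q; exact ih es hr _ _
            · simp only [if_neg hf]

lemma okParse : ∀ (logs : List String) (len : Nat) (stk : List Int),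
    okLogs len stk logs = true →
    ∃ evs, parseAll logs = some evs ∧ okE len stk evs = true ∧ evs.length = logs.length := by
  intro logs
  induction logs with
  | nil => intro len stk _; exact ⟨[], rfl, rfl, rfl⟩
  | cons log rest ih =>
    intro len stk hok
    simp only [okLogs] at hok
    cases hp : parseLog log with
    | none => rw [hp] at hok; exact absurd hok (by simp)
    | some v =>
      obtain ⟨fid, act, ts⟩ := v
      simp only [hp] at hok
      by_cases hs : act = "start".toList
      · rw [if_pos hs] at hok
        have h1 := (Bool.and_eq_true ..).mp hok
        obtain ⟨evs, he, hoke, hlen⟩ := ih len (fid :: stk) h1.2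
        refine ⟨(fid, act == "start".toList, ts) :: evs, ?_, ?_, by simp [hlen]⟩
        · simp only [parseAll, hp, he]
        · simp only [okE, hs, beq_self_eq_true, if_pos]
          exact (Bool.and_eq_true ..).mpr ⟨h1.1, hoke⟩
      · rw [if_neg hs] at hok
        cases stk with
        | nil => exact absurd hok (by simp)
        | cons top stk' =>
          have h1 := (Bool.and_eq_true ..).mp hok
          have h2 := (Bool.and_eq_true ..).mp h1.1
          obtain ⟨evs, he, hoke, hlen⟩ := ih len stk' h1.2
          have hb : (act == "start".toList) = false := beq_eq_false_iff_ne.mpr hs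
          refine ⟨(fid, act == "start".toList, ts) :: evs, ?_, ?_, by simp [hlen]⟩
          · simp only [parseAll, hp, he]
          · simp only [okE, hb, Bool.false_eq_true, if_false]
            exact (Bool.and_eq_true ..).mpr ⟨(Bool.and_eq_true ..).mpr ⟨h2.1, h2.2⟩, hoke⟩

-- the heart: one `run` of B corresponds to A processing the same events with the call on top
lemma run_eq (len : Nat) : ∀ (fuel : Nat) (events : List (Int × Bool × Int)) (fid cur : Int)
    (st : List (Int × Int)) (times : List Int),
    okE len (fid :: st.map Prod.fst) events = true → events.length < fuel →
    okE len (st.map Prod.fst) (runB fuel times events fid cur).2.1 = true ∧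
    (runB fuel times events fid cur).2.1.length ≤ events.length ∧
    goAe times ((fid, cur) :: st) events =
      goAe (runB fuel times events fid cur).1 (retop st ((runB fuel times events fid cur).2.2 + 1))
        (runB fuel times events fid cur).2.1 := by
  intro fuel
  induction fuel with
  | zero => intro events fid cur st times _ h; omega
  | succ fuel ih =>
    intro events fid cur st times hok hlen
    cases events with
    | nil =>
      refine ⟨rfl, le_refl _, ?_⟩
      cases st with
      | nil => rfl
      | cons p tl => obtain ⟨y, t⟩ := p; rfl
    | cons e rest =>
      obtain ⟨fid2, isStart2, ts2⟩ := e
      cases isStart2 with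
      | false =>
        -- an end event: okE forces fid2 = fid
        simp only [okE, Bool.false_eq_true, if_false] at hok
        have h1 := (Bool.and_eq_true ..).mp hok
        have h2 := (Bool.and_eq_true ..).mp h1.1
        have hfe : fid2 = fid := by simpa using h2.1
        subst hfe
        simp only [runB, Bool.false_eq_true, if_false]
        refine ⟨h1.2, by simp, ?_⟩
        simp only [goAe, Bool.false_eq_true, if_false]
        cases st with
        | nil => rfl
        | cons p tl => obtain ⟨y, t⟩ := p; rfl
      | true =>
        -- a start event: two uses of the induction hypothesis (the inner call, then the resumption)
        simp only [okE] at hok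
        have h1 := (Bool.and_eq_true ..).mp hok
        have hok2 : okE len (fid2 :: ((fid, cur) :: st).map Prod.fst) rest = true := by
          simpa using h1.2
        have hlen2 : rest.length < fuel := by simp at hlen; omega
        obtain ⟨ha, hb, hc⟩ := ih rest fid2 ts2 ((fid, cur) :: st)
          (PySem.List.pySetD times fid (PySem.List.pyGetD times fid 0 + (ts2 - cur))) hok2 hlen2
        rcases hr1 : runB fuel (PySem.List.pySetD times fid (PySem.List.pyGetD times fid 0 + (ts2 - cur))) rest fid2 ts2 with ⟨t2, rest2, e2⟩
        rw [hr1] at ha hb hc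
        simp only [List.map] at ha
        have hlen3 : rest2.length < fuel := by simp at hlen hb ⊢; omega
        obtain ⟨ha', hb', hc'⟩ := ih rest2 fid (e2 + 1) st t2 ha hlen3
        have hstep : runB (fuel + 1) times ((fid2, true, ts2) :: rest) fid cur
            = runB fuel t2 rest2 fid (e2 + 1) := by
          simp only [runB, if_true, hr1]
        rw [hstep]
        refine ⟨ha', by simp at hb hb' ⊢; omega, ?_⟩
        have hgo : goAe times ((fid, cur) :: st) ((fid2, true, ts2) :: rest)
            = goAe (PySem.List.pySetD times fid (PySem.List.pyGetD times fid 0 + (ts2 - cur)))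
                ((fid2, ts2) :: (fid, cur) :: st) rest := by
          simp only [goAe, if_true]
        rw [hgo, hc]
        simpa [retop] using hc'

lemma top_eq (len : Nat) : ∀ (fuel : Nat) (events : List (Int × Bool × Int)) (times : List Int),
    okE len [] events = true → events.length < fuel →
    goAe times [] events = topB fuel times events := by
  intro fuel
  induction fuel with
  | zero => intro events times _ h; omega
  | succ fuel ih =>
    intro events times hok hlen
    cases events with
    | nil => rfl
    | cons e rest =>
      obtain ⟨fid, isStart, ts⟩ := e
      cases isStart with
      | false => simp [okE] at hok
      | true =>
        simp only [okE, Bool.true_and] at hok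
        have hlen2 : rest.length < fuel := by simp at hlen; omega
        have := run_eq len fuel rest fid ts [] times (by simpa using hok) hlen2
        rcases hr : runB fuel times rest fid ts with ⟨t', rest', e'⟩
        rw [hr] at this
        obtain ⟨ha, hb, hc⟩ := this
        simp only [List.map] at ha
        have hstep : topB (fuel + 1) times ((fid, true, ts) :: rest) = topB fuel t' rest' := by
          simp only [topB, hr]
        rw [hstep]
        have hgo : goAe times [] ((fid, true, ts) :: rest) = goAe times [(fid, ts)] rest := by
          simp only [goAe, if_true]
        rw [hgo, hc]
        simp only [retop]
        exact ih rest' t' ha (by simp at hb ⊢; omega)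

-- ===== VERDICT (by name: the statement is the Claim_ definition above) =====
theorem exclusiveTime_spec : Claim_equal_exclusiveTime := by
  intro n logs _ hpre
  unfold Spec_exclusiveTime exclusiveTime exclusiveTime_alt
  obtain ⟨evs, hparse, hok, hlen⟩ := okParse logs n.toNat [] hpre
  rw [hparse]
  rw [bridgeA logs evs hparse (List.replicate n.toNat 0) []]
  exact top_eq n.toNat (logs.length + 1) evs (List.replicate n.toNat 0) hok (by omega)
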